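-- pv_equiv track=rewrite | github.com/bpnsingh/practice | scaler/day22/kdiff.py | solve
-- ===== SOURCE A (Python) =====
-- def solve(A,B):
--     N = len(A)
--     if N == 1:
--         return 0
--     set_a = set()
--     for num in A:
--         if num-B in set_a or num+B in set_a:
--             return 1
--         else:
--             set_a.add(num)
--     return 0
-- ===== SOURCE B (Python) =====
-- def solve(A, B):
--     S = sorted(A)
--     t = abs(B)
--     for j in range(1, len(S)):
--         v = S[j] - t
--         lo, hi = 0, j
--         while lo < hi:
--             mid = (lo + hi) // 2
--             if S[mid] < v:
--                 lo = mid + 1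
--             else:
--                 hi = mid
--         if lo < j and S[lo] == v:
--             return 1
--     return 0
-- ===== Notes on version B (the rewrite author's own statement) =====
-- stated objective: alternative
-- what changed: Replaces A's one-pass hash-set scan (checking num-B and num+B against previously seen elements) with a sorted copy of A plus a hand-written binary search per element: for each j it searches S[j]-abs(B) among the earlier sorted elements; no set and no special case for single-element input.
import Mathlib
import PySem

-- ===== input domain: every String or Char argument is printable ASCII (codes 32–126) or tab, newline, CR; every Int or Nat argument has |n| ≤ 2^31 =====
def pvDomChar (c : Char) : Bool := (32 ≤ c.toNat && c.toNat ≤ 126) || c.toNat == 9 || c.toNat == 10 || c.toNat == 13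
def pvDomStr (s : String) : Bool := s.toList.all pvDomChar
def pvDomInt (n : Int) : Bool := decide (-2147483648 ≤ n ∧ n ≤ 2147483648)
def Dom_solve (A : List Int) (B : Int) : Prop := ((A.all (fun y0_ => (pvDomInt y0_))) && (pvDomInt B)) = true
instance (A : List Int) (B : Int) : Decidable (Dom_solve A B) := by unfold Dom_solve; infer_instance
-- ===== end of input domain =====

-- B replaces A's one-pass seen-set scan by a sorted copy plus a hand-written binary search per element (a different algorithm, not claimed faster).

-- ===== PORT A =====
-- 'for num in A: if num-B in set_a or num+B in set_a: return 1 else set_a.add(num)'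
def solveLoopA (B : Int) : List Int → PySem.Set Int → Int
  | [], _ => 0
  | num :: rest, set_a =>
    if PySem.Set.contains set_a (num - B) || PySem.Set.contains set_a (num + B) then 1
    else solveLoopA B rest (PySem.Set.add set_a num)

def solve (A : List Int) (B : Int) : Int :=
  let N : Int := (A.length : Int)
  if N = 1 then 0
  else solveLoopA B A PySem.Set.empty

-- ===== PORT B =====
-- 'while lo < hi: mid = (lo + hi) // 2; if S[mid] < v: lo = mid + 1 else: hi = mid' (returns the final lo)
def bsearchB (S : List Int) (v : Int) (lo hi : Int) : Int :=
  if h : lo < hi then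
    let mid := PySem.Int.floordiv (lo + hi) 2
    if PySem.List.pyGetD S mid 0 < v then bsearchB S v (mid + 1) hi
    else bsearchB S v lo mid
  else lo
termination_by (hi - lo).toNat
decreasing_by
  · have h1 := PySem.Int.floordiv_two_mid_bounds (le_of_lt h)
    omega
  · have h2 : PySem.Int.floordiv (lo + hi) 2 < hi := by
      rw [PySem.Int.floordiv_lt_iff_lt_mul (by norm_num)]
      omega
    omega

-- 'for j in range(1, len(S)): v = S[j] - t; lo = <binary search>; if lo < j and S[lo] == v: return 1'
def solveOuterB (S : List Int) (t : Int) : List Int → Int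
  | [] => 0
  | j :: js =>
    let v := PySem.List.pyGetD S j 0 - t
    let lo := bsearchB S v 0 j
    if lo < j && PySem.List.pyGetD S lo 0 == v then 1 else solveOuterB S t js

def solve_alt (A : List Int) (B : Int) : Int :=
  let S := PySem.List.sorted A (fun x => x) false
  let t := |B|
  solveOuterB S t (PySem.List.pyRange 1 (S.length : Int) 1)

-- ===== PRECONDITION & SPEC =====
def Spec_solve (A : List Int) (B : Int) (out : Int) : Prop := out = solve_alt A B
instance (A : List Int) (B : Int) (out : Int) : Decidable (Spec_solve A B out) := by unfold Spec_solve; infer_instance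

-- ===== CLAIM (what is proved, stated in full; the proofs are below) =====
def Claim_equal_solve : Prop := ∀ (A : List Int) (B : Int), Dom_solve A B → Spec_solve A B (solve A B)

-- ===== LEMMAS AND PROOFS =====

-- Both programs detect the same thing: a later element pairing with an earlier one at signed difference B.
def HasPair (A : List Int) (B : Int) : Prop :=
  ∃ k j : Nat, j < k ∧ k < A.length ∧
    (A.getD k 0 - A.getD j 0 = B ∨ A.getD j 0 - A.getD k 0 = B)

-- Position-pair form with the difference taken as a given constant.
def PosPair (l : List Int) (c : Int) : Prop :=
  ∃ p q : Nat, p ≠ q ∧ p < l.length ∧ q < l.length ∧ l.getD p 0 - l.getD q 0 = c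

-- Membership/count form: invariant under permutation.
def MemPair (l : List Int) (c : Int) : Prop :=
  (c ≠ 0 ∧ ∃ x, x ∈ l ∧ x - c ∈ l) ∨ (c = 0 ∧ ∃ x, 2 ≤ l.count x)

-- ---- A side ----

theorem solveLoopA_zero_or_one (B : Int) (xs : List Int) (s : PySem.Set Int) :
    solveLoopA B xs s = 0 ∨ solveLoopA B xs s = 1 := by
  induction xs generalizing s with
  | nil => exact Or.inl rfl
  | cons x xs ih =>
    simp only [solveLoopA]
    split
    · exact Or.inr rfl
    · exact ih _

theorem solveLoopA_one_iff (B : Int) (xs : List Int) (s : PySem.Set Int) :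
    solveLoopA B xs s = 1 ↔
      ∃ k : Nat, k < xs.length ∧
        (xs.getD k 0 - B ∈ s ∨ xs.getD k 0 + B ∈ s ∨
          ∃ j : Nat, j < k ∧
            (xs.getD k 0 - xs.getD j 0 = B ∨ xs.getD j 0 - xs.getD k 0 = B)) := by
  induction xs generalizing s with
  | nil => simp [solveLoopA]
  | cons x xs ih =>
    simp only [solveLoopA]
    by_cases h : PySem.Set.contains s (x - B) || PySem.Set.contains s (x + B)
    · rw [if_pos h]
      rw [Bool.or_eq_true] at h
      constructor
      · intro _
        refine ⟨0, by simp, ?_⟩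
        rcases h with h1 | h1
        · exact Or.inl (by simpa using (PySem.Set.contains_iff _ _).1 h1)
        · exact Or.inr (Or.inl (by simpa using (PySem.Set.contains_iff _ _).1 h1))
      · intro _; rfl
    · rw [if_neg h]
      have hx1 : (x - B) ∉ s := by
        intro hm
        apply h
        rw [Bool.or_eq_true]
        exact Or.inl ((PySem.Set.contains_iff _ _).2 hm)
      have hx2 : (x + B) ∉ s := by
        intro hm
        apply h
        rw [Bool.or_eq_true]
        exact Or.inr ((PySem.Set.contains_iff _ _).2 hm)
      rw [ih]
      constructor
      · rintro ⟨k, hk, hc⟩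
        refine ⟨k + 1, by simpa using hk, ?_⟩
        rcases hc with hc | hc | ⟨j, hj, hc⟩
        · rw [PySem.Set.mem_add] at hc
          rcases hc with hc | hc
          · exact Or.inl (by simpa using hc)
          · -- xs[k] - B = x, i.e. pairing with the new head at index 0
            refine Or.inr (Or.inr ⟨0, Nat.succ_pos _, ?_⟩)
            simp only [List.getD_cons_succ, List.getD_cons_zero]
            omega
        · rw [PySem.Set.mem_add] at hc
          rcases hc with hc | hc
          · exact Or.inr (Or.inl (by simpa using hc))
          · refine Or.inr (Or.inr ⟨0, Nat.succ_pos _, ?_⟩)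
            simp only [List.getD_cons_succ, List.getD_cons_zero]
            omega
        · exact Or.inr (Or.inr ⟨j + 1, by omega, by simpa using hc⟩)
      · rintro ⟨k, hk, hc⟩
        cases k with
        | zero =>
          exfalso
          rcases hc with hc | hc | ⟨j, hj, _⟩
          · exact hx1 (by simpa using hc)
          · exact hx2 (by simpa using hc)
          · omega
        | succ k =>
          refine ⟨k, by simpa using hk, ?_⟩
          rcases hc with hc | hc | ⟨j, hj, hc⟩
          · exact Or.inl (by rw [PySem.Set.mem_add]; exact Or.inl (by simpa using hc))
          · exact Or.inr (Or.inl (by rw [PySem.Set.mem_add]; exact Or.inl (by simpa using hc)))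
          · cases j with
            | zero =>
              simp only [List.getD_cons_succ, List.getD_cons_zero] at hc
              rcases hc with hc | hc
              · refine Or.inl ?_
                rw [PySem.Set.mem_add]
                right
                omega
              · refine Or.inr (Or.inl ?_)
                rw [PySem.Set.mem_add]
                right
                omega
            | succ j =>
              exact Or.inr (Or.inr ⟨j, by omega, by simpa using hc⟩)

theorem solve_one_iff (A : List Int) (B : Int) : solve A B = 1 ↔ HasPair A B := by
  rw [show solve A B = if (A.length : Int) = 1 then 0 else solveLoopA B A PySem.Set.empty from rfl]
  unfold HasPair
  by_cases h1 : (A.length : Int) = 1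
  · rw [if_pos h1]
    have hlen : A.length = 1 := by exact_mod_cast h1
    constructor
    · intro h; exact absurd h (by norm_num)
    · rintro ⟨k, j, hjk, hk, _⟩; omega
  · rw [if_neg h1, solveLoopA_one_iff]
    constructor
    · rintro ⟨k, hk, hc⟩
      rcases hc with hc | hc | ⟨j, hj, hc⟩
      · exact absurd hc (by simp [PySem.Set.empty])
      · exact absurd hc (by simp [PySem.Set.empty])
      · exact ⟨k, j, hj, hk, hc⟩
    · rintro ⟨k, j, hjk, hk, hc⟩
      exact ⟨k, hk, Or.inr (Or.inr ⟨j, hjk, hc⟩)⟩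

theorem solve_zero_or_one (A : List Int) (B : Int) : solve A B = 0 ∨ solve A B = 1 := by
  rw [show solve A B = if (A.length : Int) = 1 then 0 else solveLoopA B A PySem.Set.empty from rfl]
  split
  · exact Or.inl rfl
  · exact solveLoopA_zero_or_one B A _

-- ---- B side ----

theorem pyGetD_toNat (S : List Int) (i : Int) (h : 0 ≤ i) :
    PySem.List.pyGetD S i 0 = S.getD i.toNat 0 := by
  conv_lhs => rw [show i = ((i.toNat : Nat) : Int) from by omega]
  rw [PySem.List.pyGetD_natCast]

theorem bsearchB_spec (S : List Int) (v : Int)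
    (hmono : ∀ p q : Nat, p ≤ q → q < S.length → S.getD p 0 ≤ S.getD q 0)
    (lo hi : Int) :
    0 ≤ lo → lo ≤ hi → hi ≤ (S.length : Int) →
      lo ≤ bsearchB S v lo hi ∧ bsearchB S v lo hi ≤ hi ∧
      (∀ i : Nat, lo ≤ (i : Int) → (i : Int) < bsearchB S v lo hi → S.getD i 0 < v) ∧
      (bsearchB S v lo hi < hi → v ≤ S.getD (bsearchB S v lo hi).toNat 0) := by
  fun_induction bsearchB S v lo hi with
  | case1 lo hi h mid hlt ih =>
    intro h0 hlh hhl
    have hm := PySem.Int.floordiv_two_mid_bounds (le_of_lt h)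
    have hmidhi : mid < hi := by
      have := PySem.Int.floordiv_lt_iff_lt_mul (a := lo + hi) (q := hi) (b := 2) (by norm_num)
      omega
    obtain ⟨ih1, ih2, ih3, ih4⟩ := ih (by omega) (by omega) (by omega)
    refine ⟨by omega, ih2, ?_, ih4⟩
    intro i hi1 hi2
    by_cases hcase : (i : Int) ≤ mid
    · have hmv : S.getD mid.toNat 0 < v := by
        rw [← pyGetD_toNat S mid (by omega)]
        exact hlt
      have := hmono i mid.toNat (by omega) (by omega)
      omega
    · exact ih3 i (by omega) hi2
  | case2 lo hi h mid hlt ih =>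
    intro h0 hlh hhl
    have hm := PySem.Int.floordiv_two_mid_bounds (le_of_lt h)
    have hmidhi : mid < hi := by
      have := PySem.Int.floordiv_lt_iff_lt_mul (a := lo + hi) (q := hi) (b := 2) (by norm_num)
      omega
    obtain ⟨ih1, ih2, ih3, ih4⟩ := ih h0 (by omega) (by omega)
    refine ⟨ih1, by omega, ih3, ?_⟩
    intro _
    by_cases hr : bsearchB S v lo mid < mid
    · exact ih4 hr
    · have hrmid : bsearchB S v lo mid = mid := by omega
      rw [hrmid]
      rw [← pyGetD_toNat S mid (by omega)]
      omega
  | case3 lo hi h =>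
    intro h0 hlh hhl
    refine ⟨le_refl _, by omega, ?_, by omega⟩
    intro i hi1 hi2
    omega

theorem bsearchB_found_iff (S : List Int) (v : Int)
    (hmono : ∀ p q : Nat, p ≤ q → q < S.length → S.getD p 0 ≤ S.getD q 0)
    (j : Int) (h0 : 0 ≤ j) (hj : j ≤ (S.length : Int)) :
    (bsearchB S v 0 j < j ∧ S.getD (bsearchB S v 0 j).toNat 0 = v) ↔
      ∃ i : Nat, (i : Int) < j ∧ S.getD i 0 = v := by
  obtain ⟨h1, h2, h3, h4⟩ := bsearchB_spec S v hmono 0 j (le_refl 0) h0 hj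
  constructor
  · rintro ⟨hlt, heq⟩
    exact ⟨(bsearchB S v 0 j).toNat, by omega, heq⟩
  · rintro ⟨i, hij, hiv⟩
    have hri : bsearchB S v 0 j ≤ (i : Int) := by
      by_contra hcon
      have := h3 i (by omega) (by omega)
      omega
    have hlt : bsearchB S v 0 j < j := by omega
    refine ⟨hlt, ?_⟩
    have hge := h4 hlt
    have hle := hmono (bsearchB S v 0 j).toNat i (by omega) (by omega)
    omega

theorem solveOuterB_zero_or_one (S : List Int) (t : Int) (js : List Int) :
    solveOuterB S t js = 0 ∨ solveOuterB S t js = 1 := by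
  induction js with
  | nil => exact Or.inl rfl
  | cons j js ih =>
    simp only [solveOuterB]
    split
    · exact Or.inr rfl
    · exact ih

theorem solveOuterB_one_iff (S : List Int) (t : Int) (js : List Int) :
    solveOuterB S t js = 1 ↔
      ∃ j ∈ js,
        bsearchB S (PySem.List.pyGetD S j 0 - t) 0 j < j ∧
        PySem.List.pyGetD S (bsearchB S (PySem.List.pyGetD S j 0 - t) 0 j) 0 =
          PySem.List.pyGetD S j 0 - t := by
  induction js with
  | nil => simp [solveOuterB]
  | cons j js ih =>
    simp only [solveOuterB]
    by_cases hc :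
        bsearchB S (PySem.List.pyGetD S j 0 - t) 0 j < j ∧
        PySem.List.pyGetD S (bsearchB S (PySem.List.pyGetD S j 0 - t) 0 j) 0 =
          PySem.List.pyGetD S j 0 - t
    · rw [if_pos (by simp [hc.1, hc.2])]
      constructor
      · intro _
        exact ⟨j, List.mem_cons_self, hc⟩
      · intro _; rfl
    · rw [if_neg ?_, ih]
      · constructor
        · rintro ⟨j', hj', hcc⟩
          exact ⟨j', by simp [hj'], hcc⟩
        · rintro ⟨j', hj', hcc⟩
          rcases List.mem_cons.1 hj' with rfl | hmem
          · exact absurd hcc hc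
          · exact ⟨j', hmem, hcc⟩
      · intro hb
        apply hc
        rw [Bool.and_eq_true] at hb
        refine ⟨by exact_mod_cast of_decide_eq_true hb.1, by simpa using hb.2⟩

theorem solve_alt_one_iff (A : List Int) (B : Int) :
    solve_alt A B = 1 ↔
      ∃ k j : Nat, j < k ∧ k < (PySem.List.sorted A (fun x => x) false).length ∧
        (PySem.List.sorted A (fun x => x) false).getD k 0 -
          (PySem.List.sorted A (fun x => x) false).getD j 0 = |B| := by
  have hmono : ∀ p q : Nat, p ≤ q → q < (PySem.List.sorted A (fun x => x) false).length →
      (PySem.List.sorted A (fun x => x) false).getD p 0 ≤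
        (PySem.List.sorted A (fun x => x) false).getD q 0 := by
    intro p q hpq hq
    rw [List.getD_eq_getElem _ 0 (by omega), List.getD_eq_getElem _ 0 hq]
    exact PySem.List.sorted_id_getElem_mono A hpq hq
  set S := PySem.List.sorted A (fun x => x) false with hS
  rw [show solve_alt A B = solveOuterB S |B| (PySem.List.pyRange 1 (S.length : Int) 1) from rfl]
  rw [solveOuterB_one_iff]
  constructor
  · rintro ⟨j, hjmem, hlt, heq⟩
    rw [PySem.List.mem_pyRange_one] at hjmem
    obtain ⟨hj1, hj2⟩ := hjmem
    obtain ⟨h1, h2, h3, h4⟩ := bsearchB_spec S (PySem.List.pyGetD S j 0 - |B|) hmono 0 j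
      (le_refl 0) (by omega) (by omega)
    have e1 : PySem.List.pyGetD S j 0 = S.getD j.toNat 0 := pyGetD_toNat S j (by omega)
    have e2 : PySem.List.pyGetD S (bsearchB S (PySem.List.pyGetD S j 0 - |B|) 0 j) 0 =
        S.getD (bsearchB S (PySem.List.pyGetD S j 0 - |B|) 0 j).toNat 0 :=
      pyGetD_toNat S _ (by omega)
    exact ⟨j.toNat, (bsearchB S (PySem.List.pyGetD S j 0 - |B|) 0 j).toNat, by omega, by omega,
      by omega⟩
  · rintro ⟨k, j, hjk, hk, hc⟩
    refine ⟨(k : Int), ?_, ?_⟩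
    · rw [PySem.List.mem_pyRange_one]
      constructor
      · omega
      · exact_mod_cast hk
    · have hfound := (bsearchB_found_iff S ((S.getD k 0) - |B|) hmono (k : Int) (by omega)
        (by exact_mod_cast hk.le)).2 ⟨j, by exact_mod_cast hjk, by omega⟩
      rw [pyGetD_toNat S (k : Int) (by omega), Int.toNat_natCast]
      refine ⟨hfound.1, ?_⟩
      obtain ⟨h1, _, _, _⟩ := bsearchB_spec S ((S.getD k 0) - |B|) hmono 0 (k : Int)
        (le_refl 0) (by omega) (by exact_mod_cast hk.le)
      rw [pyGetD_toNat S _ (by omega)]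
      exact hfound.2

-- ---- pair-existence chain ----

theorem hasPair_iff_posPair (A : List Int) (B : Int) : HasPair A B ↔ PosPair A |B| := by
  unfold HasPair PosPair
  constructor
  · rintro ⟨k, j, hjk, hk, hc⟩
    rcases hc with hc | hc
    · by_cases hB : 0 ≤ B
      · exact ⟨k, j, by omega, hk, by omega, by rw [abs_of_nonneg hB]; omega⟩
      · exact ⟨j, k, by omega, by omega, hk, by rw [abs_of_neg (by omega)]; omega⟩
    · by_cases hB : 0 ≤ B
      · exact ⟨j, k, by omega, by omega, hk, by rw [abs_of_nonneg hB]; omega⟩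
      · exact ⟨k, j, by omega, hk, by omega, by rw [abs_of_neg (by omega)]; omega⟩
  · rintro ⟨p, q, hpq, hp, hq, hc⟩
    rcases abs_cases B with ⟨hB, _⟩ | ⟨hB, _⟩
    · rcases Nat.lt_or_ge q p with hlt | hge
      · exact ⟨p, q, hlt, hp, Or.inl (by omega)⟩
      · exact ⟨q, p, by omega, hq, Or.inr (by omega)⟩
    · rcases Nat.lt_or_ge q p with hlt | hge
      · exact ⟨p, q, hlt, hp, Or.inr (by omega)⟩
      · exact ⟨q, p, by omega, hq, Or.inl (by omega)⟩

theorem two_le_count_iff_posPair_zero (l : List Int) :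
    (∃ x, 2 ≤ l.count x) ↔
      ∃ p q : Nat, p ≠ q ∧ p < l.length ∧ q < l.length ∧ l.getD p 0 = l.getD q 0 := by
  constructor
  · rintro ⟨x, hx⟩
    have hd := List.duplicate_iff_two_le_count.2 hx
    obtain ⟨n, m, hnm, hn, hm⟩ := List.duplicate_iff_exists_distinct_get.1 hd
    refine ⟨n, m, by omega, n.isLt, m.isLt, ?_⟩
    rw [List.getD_eq_getElem _ 0 n.isLt, List.getD_eq_getElem _ 0 m.isLt]
    rw [← List.get_eq_getElem, ← List.get_eq_getElem, ← hn, ← hm]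
  · rintro ⟨p, q, hpq, hp, hq, hc⟩
    have hgp : l.get ⟨p, hp⟩ = l.getD p 0 := by
      rw [List.getD_eq_getElem _ 0 hp, List.get_eq_getElem]
    have hgq : l.get ⟨q, hq⟩ = l.getD q 0 := by
      rw [List.getD_eq_getElem _ 0 hq, List.get_eq_getElem]
    refine ⟨l.getD p 0, List.duplicate_iff_two_le_count.1 ?_⟩
    rcases Nat.lt_or_ge p q with hlt | hge
    · exact List.duplicate_iff_exists_distinct_get.2
        ⟨⟨p, hp⟩, ⟨q, hq⟩, by simpa using hlt, hgp.symm, by rw [hgq, hc]⟩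
    · have hqp : q < p := by omega
      exact List.duplicate_iff_exists_distinct_get.2
        ⟨⟨q, hq⟩, ⟨p, hp⟩, by simpa using hqp, by rw [hgq, hc], hgp.symm⟩

theorem posPair_iff_memPair (l : List Int) (c : Int) : PosPair l c ↔ MemPair l c := by
  unfold PosPair MemPair
  by_cases hc0 : c = 0
  · subst hc0
    constructor
    · rintro ⟨p, q, hpq, hp, hq, hc⟩
      exact Or.inr ⟨rfl, (two_le_count_iff_posPair_zero l).2 ⟨p, q, hpq, hp, hq, by omega⟩⟩
    · rintro (⟨hne, _⟩ | ⟨_, hx⟩)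
      · exact absurd rfl hne
      · obtain ⟨p, q, hpq, hp, hq, hc⟩ := (two_le_count_iff_posPair_zero l).1 hx
        exact ⟨p, q, hpq, hp, hq, by omega⟩
  · constructor
    · rintro ⟨p, q, hpq, hp, hq, hc⟩
      refine Or.inl ⟨hc0, l.getD p 0, ?_, ?_⟩
      · rw [List.getD_eq_getElem _ 0 hp]
        exact List.getElem_mem hp
      · rw [show l.getD p 0 - c = l.getD q 0 from by omega, List.getD_eq_getElem _ 0 hq]
        exact List.getElem_mem hq
    · rintro (⟨_, x, hx1, hx2⟩ | ⟨hz, _⟩)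
      · obtain ⟨p, hp, hpe⟩ := List.mem_iff_getElem.1 hx1
        obtain ⟨q, hq, hqe⟩ := List.mem_iff_getElem.1 hx2
        refine ⟨p, q, ?_, hp, hq, ?_⟩
        · intro hpq
          subst hpq
          rw [hpe] at hqe
          omega
        · rw [List.getD_eq_getElem _ 0 hp, List.getD_eq_getElem _ 0 hq, hpe, hqe]
          ring
      · exact absurd hz hc0

theorem memPair_perm (l l' : List Int) (c : Int) (h : l.Perm l') : MemPair l c ↔ MemPair l' c := by
  unfold MemPair
  constructor
  · rintro (⟨hne, x, hx1, hx2⟩ | ⟨hz, x, hx⟩)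
    · exact Or.inl ⟨hne, x, h.mem_iff.1 hx1, h.mem_iff.1 hx2⟩
    · exact Or.inr ⟨hz, x, by rw [← h.count_eq]; exact hx⟩
  · rintro (⟨hne, x, hx1, hx2⟩ | ⟨hz, x, hx⟩)
    · exact Or.inl ⟨hne, x, h.mem_iff.2 hx1, h.mem_iff.2 hx2⟩
    · exact Or.inr ⟨hz, x, by rw [h.count_eq]; exact hx⟩

theorem posPair_sorted_iff (A : List Int) (c : Int) (hc : 0 ≤ c) :
    PosPair (PySem.List.sorted A (fun x => x) false) c ↔
      ∃ k j : Nat, j < k ∧ k < (PySem.List.sorted A (fun x => x) false).length ∧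
        (PySem.List.sorted A (fun x => x) false).getD k 0 -
          (PySem.List.sorted A (fun x => x) false).getD j 0 = c := by
  have hmono : ∀ p q : Nat, p ≤ q → q < (PySem.List.sorted A (fun x => x) false).length →
      (PySem.List.sorted A (fun x => x) false).getD p 0 ≤
        (PySem.List.sorted A (fun x => x) false).getD q 0 := by
    intro p q hpq hq
    rw [List.getD_eq_getElem _ 0 (by omega), List.getD_eq_getElem _ 0 hq]
    exact PySem.List.sorted_id_getElem_mono A hpq hq
  unfold PosPair
  constructor
  · rintro ⟨p, q, hpq, hp, hq, hd⟩
    rcases Nat.lt_or_ge q p with hlt | hge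
    · exact ⟨p, q, hlt, hp, hd⟩
    · have hple : p < q := by omega
      have := hmono p q (by omega) hq
      exact ⟨q, p, hple, hq, by omega⟩
  · rintro ⟨k, j, hjk, hk, hd⟩
    exact ⟨k, j, by omega, hk, by omega, hd⟩

theorem solve_alt_zero_or_one (A : List Int) (B : Int) :
    solve_alt A B = 0 ∨ solve_alt A B = 1 := by
  rw [show solve_alt A B = solveOuterB (PySem.List.sorted A (fun x => x) false) |B|
      (PySem.List.pyRange 1 ((PySem.List.sorted A (fun x => x) false).length : Int) 1) from rfl]
  exact solveOuterB_zero_or_one _ _ _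

theorem solve_alt_one_iff_hasPair (A : List Int) (B : Int) :
    solve_alt A B = 1 ↔ HasPair A B := by
  rw [solve_alt_one_iff, ← posPair_sorted_iff A |B| (abs_nonneg B),
    posPair_iff_memPair, memPair_perm _ A |B| (PySem.List.sorted_perm A (fun x => x) false),
    ← posPair_iff_memPair, ← hasPair_iff_posPair]

-- ===== VERDICT (by name: the statement is the Claim_ definition above) =====
theorem solve_spec : Claim_equal_solve := by
  intro A B _
  unfold Spec_solve
  by_cases h : HasPair A B
  · rw [(solve_one_iff A B).2 h, (solve_alt_one_iff_hasPair A B).2 h]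
  · rcases solve_zero_or_one A B with h0 | h1
    · rcases solve_alt_zero_or_one A B with g0 | g1
      · rw [h0, g0]
      · exact absurd ((solve_alt_one_iff_hasPair A B).1 g1) h
    · exact absurd ((solve_one_iff A B).1 h1) h
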